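-- pv_equiv track=rewrite | github.com/Demiurge451/LanguagesAndSystemOfProgramming | Subject/task2/task2-11.py | new_matrix
-- ===== SOURCE A (Python) =====
-- from collections import deque
--
-- def new_matrix(arr: [[]], delete_rows: deque, delete_columns: deque) -> [[]]:
--     set_of_delete_rows = set(delete_rows)
--     set_of_delete_columns = set(delete_columns)
--
--     matrix = []
--     for i in range(0, len(arr)):
--         if i in set_of_delete_rows:
--             continue
--         row = []
--         for j in range(0, len(arr[0])):
--             if j in set_of_delete_columns:
--                 continue
--             row.append(arr[i][j])
--         matrix.append(row)
--
--     return matrix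
-- ===== SOURCE B (Python) =====
-- def new_matrix(arr, delete_rows, delete_columns):
--     # Sort-then-scan: sort the unique in-range delete indices, cut [0, n) into
--     # maximal kept segments, and build the result by concatenating block slices,
--     # with no per-element membership tests.
--     def segments(n, deletes):
--         cuts = sorted({d for d in deletes if 0 <= d < n})
--         segs = []
--         start = 0
--         for c in cuts:
--             if start < c:
--                 segs.append((start, c))
--             start = c + 1
--         if start < n:
--             segs.append((start, n))
--         return segs
--
--     if not arr:
--         return []
--     row_segs = segments(len(arr), delete_rows)
--     col_segs = segments(len(arr[0]), delete_columns)
--     out = []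
--     for a, b in row_segs:
--         for row in arr[a:b]:
--             new_row = []
--             for c, d in col_segs:
--                 new_row += row[c:d]
--             out.append(new_row)
--     return out
-- ===== Notes on version B (the rewrite author's own statement) =====
-- stated objective: alternative
-- what changed: B sorts the unique in-range delete indices, cuts the row and column ranges into maximal kept segments, and assembles the result by concatenating whole slices arr[a:b] / row[c:d], replacing A's per-element set-membership skip loops entirely.
import Mathlib
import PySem

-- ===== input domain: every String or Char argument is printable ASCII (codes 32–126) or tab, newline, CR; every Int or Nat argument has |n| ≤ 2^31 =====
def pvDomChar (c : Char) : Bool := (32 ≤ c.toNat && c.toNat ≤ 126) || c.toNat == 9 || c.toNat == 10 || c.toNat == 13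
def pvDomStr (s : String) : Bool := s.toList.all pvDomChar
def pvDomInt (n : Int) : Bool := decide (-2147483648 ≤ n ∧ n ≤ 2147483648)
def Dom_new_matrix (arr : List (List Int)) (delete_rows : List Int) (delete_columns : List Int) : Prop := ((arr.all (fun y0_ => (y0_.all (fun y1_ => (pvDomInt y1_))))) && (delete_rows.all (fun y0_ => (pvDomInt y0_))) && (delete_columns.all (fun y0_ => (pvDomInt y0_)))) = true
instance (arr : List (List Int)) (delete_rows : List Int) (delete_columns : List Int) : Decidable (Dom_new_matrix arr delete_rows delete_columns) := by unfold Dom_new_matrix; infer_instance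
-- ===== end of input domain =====

-- B replaces A's per-index membership-skip loops by a sort-then-scan algorithm: it sorts the
-- unique in-range delete indices, cuts [0,n) into maximal kept segments, and concatenates slices.

-- ===== PORT A =====
def new_matrix (arr : List (List Int)) (delete_rows : List Int) (delete_columns : List Int) : List (List Int) :=
  let set_of_delete_rows := PySem.Set.ofList delete_rows
  let set_of_delete_columns := PySem.Set.ofList delete_columns
  (List.range arr.length).foldl (fun matrix (i : Nat) =>
    if (i : Int) ∈ set_of_delete_rows then matrix
    else
      matrix ++ [ (List.range (arr.headD []).length).foldl (fun row (j : Nat) =>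
        if (j : Int) ∈ set_of_delete_columns then row
        else row ++ [(arr.getD i []).getD j 0]) [] ]) []

-- ===== PORT B =====
-- segments(n, deletes): sorted unique in-range cuts, then the fold accumulating (segs, start)
def pvSegments (n : Int) (deletes : List Int) : List (Int × Int) :=
  let cuts := PySem.List.sorted (PySem.Set.ofList
      (deletes.filter (fun d => decide (0 ≤ d ∧ d < n)))) (fun x => x) false
  let p := cuts.foldl (fun (p : List (Int × Int) × Int) c =>
      (if p.2 < c then p.1 ++ [(p.2, c)] else p.1, c + 1)) ([], 0)
  if p.2 < n then p.1 ++ [(p.2, n)] else p.1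

def new_matrix_alt (arr : List (List Int)) (delete_rows : List Int) (delete_columns : List Int) : List (List Int) :=
  if arr.isEmpty then []
  else
    let row_segs := pvSegments (arr.length : Int) delete_rows
    let col_segs := pvSegments ((arr.headD []).length : Int) delete_columns
    row_segs.foldl (fun out ab =>
      (PySem.List.slice arr (some ab.1) (some ab.2)).foldl (fun out row =>
        out ++ [ col_segs.foldl (fun new_row cd =>
          new_row ++ PySem.List.slice row (some cd.1) (some cd.2)) [] ]) out) []

-- ===== PRECONDITION & SPEC =====
-- Pre_ excludes exactly the inputs on which Python A raises IndexError: a kept row shorter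
-- than len(arr[0]) at some kept column index (A indexes every kept row up to len(arr[0]));
-- B's slices clamp there, so B returns the truncated submatrix where A raises.
def Pre_new_matrix (arr : List (List Int)) (delete_rows : List Int) (delete_columns : List Int) : Prop :=
  ∀ i, i < arr.length → (i : Int) ∉ delete_rows →
    ∀ j, j < (arr.headD []).length → (j : Int) ∉ delete_columns → j < (arr.getD i []).length
instance (arr : List (List Int)) (delete_rows : List Int) (delete_columns : List Int) : Decidable (Pre_new_matrix arr delete_rows delete_columns) := by unfold Pre_new_matrix; infer_instance
def pvWitness_new_matrix : List (List Int) × List Int × List Int := ([[1, 2], [3, 4]], [0], [1])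

def Spec_new_matrix (arr : List (List Int)) (delete_rows : List Int) (delete_columns : List Int) (out : List (List Int)) : Prop := out = new_matrix_alt arr delete_rows delete_columns
instance (arr : List (List Int)) (delete_rows : List Int) (delete_columns : List Int) (out : List (List Int)) : Decidable (Spec_new_matrix arr delete_rows delete_columns out) := by unfold Spec_new_matrix; infer_instance

-- ===== CLAIM (what is proved, stated in full; the proofs are below) =====
def Claim_equal_new_matrix : Prop := ∀ (arr : List (List Int)) (delete_rows : List Int) (delete_columns : List Int), Dom_new_matrix arr delete_rows delete_columns → Pre_new_matrix arr delete_rows delete_columns → Spec_new_matrix arr delete_rows delete_columns (new_matrix arr delete_rows delete_columns)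

-- ===== LEMMAS AND PROOFS =====

-- the sorted unique in-range cut list that pvSegments builds
def cutsOf (n : Int) (dels : List Int) : List Int :=
  PySem.List.sorted (PySem.Set.ofList
    (dels.filter (fun d => decide (0 ≤ d ∧ d < n)))) (fun x => x) false

theorem mem_cutsOf (n : Int) (dels : List Int) (x : Int) :
    x ∈ cutsOf n dels ↔ x ∈ dels ∧ 0 ≤ x ∧ x < n := by
  unfold cutsOf
  rw [PySem.List.mem_sorted, PySem.Set.mem_ofList, List.mem_filter]
  simp

theorem pairwise_cutsOf (n : Int) (dels : List Int) : (cutsOf n dels).Pairwise (· < ·) :=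
  PySem.List.sorted_ofList_pairwise_lt _

-- recursion-shaped form of the segment loop (proof helper)
def segsAux (start n : Int) : List Int → List (Int × Int)
  | [] => if start < n then [(start, n)] else []
  | c :: cs => (if start < c then [(start, c)] else []) ++ segsAux (c + 1) n cs

theorem segs_foldl_eq (n : Int) (cuts : List Int) (acc : List (Int × Int)) (s : Int) :
    (let p := cuts.foldl (fun (p : List (Int × Int) × Int) c =>
        (if p.2 < c then p.1 ++ [(p.2, c)] else p.1, c + 1)) (acc, s);
     if p.2 < n then p.1 ++ [(p.2, n)] else p.1) = acc ++ segsAux s n cuts := by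
  induction cuts generalizing acc s with
  | nil => simp only [List.foldl_nil, segsAux]; split <;> simp
  | cons c cs ih =>
    simp only [List.foldl_cons, segsAux]
    rw [show (if s < c then acc ++ [(s, c)] else acc) = acc ++ (if s < c then [(s, c)] else [])
          by split <;> simp]
    rw [← List.append_assoc]
    exact (by simpa using ih (acc ++ if s < c then [(s, c)] else []) (c + 1))

theorem pvSegments_eq (n : Int) (dels : List Int) :
    pvSegments n dels = segsAux 0 n (cutsOf n dels) := by
  unfold pvSegments cutsOf
  exact segs_foldl_eq n _ [] 0

-- every segment is nonempty and within [start, n)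
theorem segsAux_bounds (n : Int) (cuts : List Int) (start : Int)
    (hs : cuts.Pairwise (· < ·)) (hm : ∀ c ∈ cuts, start ≤ c ∧ c < n) :
    ∀ p ∈ segsAux start n cuts, start ≤ p.1 ∧ p.1 < p.2 ∧ p.2 ≤ n := by
  induction cuts generalizing start with
  | nil =>
    intro p hp
    simp only [segsAux] at hp
    split at hp <;> simp_all
  | cons c cs ih =>
    intro p hp
    have hc := hm c (by simp)
    rcases List.pairwise_cons.1 hs with ⟨hlt, hs'⟩
    simp only [segsAux, List.mem_append] at hp
    rcases hp with hp | hp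
    · split at hp <;> simp_all
      omega
    · have := ih (c + 1) hs'
        (fun x hx => ⟨by have := hlt x hx; omega, (hm x (by simp [hx])).2⟩) p hp
      omega

-- the indices covered by the segments are exactly the non-cut indices of [start, n)
theorem segsAux_flat (n : Int) (cuts : List Int) (start : Int)
    (hs : cuts.Pairwise (· < ·)) (hm : ∀ c ∈ cuts, start ≤ c ∧ c < n) :
    (segsAux start n cuts).flatMap (fun p => PySem.List.pyRange p.1 p.2 1)
      = (PySem.List.pyRange start n 1).filter (fun i => decide (i ∉ cuts)) := by
  induction cuts generalizing start with
  | nil =>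
    simp only [segsAux]
    split
    · simp
    · rw [PySem.List.pyRange_one_eq_nil (by omega)]; simp
  | cons c cs ih =>
    rcases List.pairwise_cons.1 hs with ⟨hlt, hs'⟩
    have hc := hm c (by simp)
    simp only [segsAux, List.flatMap_append]
    have h1 : (if start < c then [(start, c)] else []).flatMap
        (fun p => PySem.List.pyRange p.1 p.2 1) = PySem.List.pyRange start c 1 := by
      split
      · simp
      · rw [PySem.List.pyRange_one_eq_nil (by omega)]; simp
    rw [h1, ih (c + 1) hs'
      (fun x hx => ⟨by have := hlt x hx; omega, (hm x (by simp [hx])).2⟩)]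
    rw [PySem.List.pyRange_one_append start c n hc.1 (by omega),
        PySem.List.pyRange_one_cons (show c < n from hc.2)]
    rw [List.filter_append, List.filter_cons_of_neg (by simp)]
    congr 1
    · symm
      rw [List.filter_eq_self]
      intro i hi
      have hmem := PySem.List.mem_pyRange_one.1 hi
      simp only [decide_eq_true_iff, List.mem_cons, not_or]
      exact ⟨by omega, fun hx => by have := hlt i hx; omega⟩
    · symm
      apply List.filter_congr
      intro i hi
      have hmem := PySem.List.mem_pyRange_one.1 hi
      have hne : i ≠ c := by omega
      simp [hne]

-- a slice with in-range bounds is the map of indexing over the index range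
theorem slice_eq_map_range {α : Type} (xs : List α) (d : α) (a b : Int)
    (ha : 0 ≤ a) (hb0 : 0 ≤ b) (hb : b.toNat ≤ xs.length) :
    PySem.List.slice xs (some a) (some b)
      = (PySem.List.pyRange a b 1).map (fun j => xs.getD j.toNat d) := by
  rw [PySem.List.slice_toNat xs ha hb0, PySem.List.pyRange_one]
  apply List.ext_getElem
  · simp only [List.length_take, List.length_drop, List.map_map, List.length_map,
      List.length_range]
    omega
  · intro k hk1 hk2
    simp only [List.length_take, List.length_drop, lt_min_iff] at hk1
    simp only [List.getElem_take, List.getElem_drop, List.getElem_map, List.getElem_range]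
    have hidx : (a + (k : Int)).toNat = a.toNat + k := by omega
    rw [hidx, List.getD_eq_getElem xs d (by omega)]

-- 'continue'-shaped skip loop = map over the filtered index list
theorem foldl_skip {β : Type} (S : PySem.Set Int) (f : Nat → β) (l : List Nat) (acc : List β) :
    l.foldl (fun acc (i : Nat) => if (i : Int) ∈ S then acc else acc ++ [f i]) acc
      = acc ++ (l.filter (fun (i : Nat) => decide ((i : Int) ∉ S))).map f := by
  have h : (fun (acc : List β) (i : Nat) => if (i : Int) ∈ S then acc else acc ++ [f i])
      = fun acc (i : Nat) => if decide ((i : Int) ∉ S) = true then acc ++ [f i] else acc := by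
    funext a i
    by_cases hm : (i : Int) ∈ S <;> simp [hm]
  rw [h, PySem.List.foldl_append_if]

theorem new_matrix_char (arr : List (List Int)) (dr dc : List Int) :
    new_matrix arr dr dc
      = ((List.range arr.length).filter (fun (i : Nat) => decide ((i : Int) ∉ PySem.Set.ofList dr))).map
          (fun i => ((List.range (arr.headD []).length).filter
              (fun (j : Nat) => decide ((j : Int) ∉ PySem.Set.ofList dc))).map
            (fun j => (arr.getD i []).getD j 0)) := by
  unfold new_matrix
  simp only [foldl_skip, List.nil_append]

-- the kept Int indices of [0, n) are the casts of the kept Nat indices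
theorem kept_bridge (n : Nat) (dels : List Int) :
    (PySem.List.pyRange 0 (n : Int) 1).filter (fun i => decide (i ∉ cutsOf (n : Int) dels))
      = ((List.range n).filter (fun (i : Nat) => decide ((i : Int) ∉ PySem.Set.ofList dels))).map
          (fun (i : Nat) => (i : Int)) := by
  rw [PySem.List.pyRange_zero_nat, List.filter_map]
  have h : (List.range n).filter
        ((fun i => decide (i ∉ cutsOf (n : Int) dels)) ∘ (fun (k : Nat) => (k : Int)))
      = (List.range n).filter (fun (i : Nat) => decide ((i : Int) ∉ PySem.Set.ofList dels)) := by
    apply List.filter_congr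
    intro i hi
    have hi' : i < n := List.mem_range.mp hi
    simp only [Function.comp_apply, decide_eq_decide, mem_cutsOf, PySem.Set.mem_ofList]
    constructor
    · intro h hd
      exact h ⟨hd, by positivity, by exact_mod_cast hi'⟩
    · intro h hc
      exact h hc.1
  rw [h]

-- concatenating the slices over the kept segments = indexing over the kept indices
theorem segs_slice_eq {α : Type} (xs : List α) (d : α) (n : Int) (cuts : List Int)
    (hs : cuts.Pairwise (· < ·)) (hm : ∀ c ∈ cuts, 0 ≤ c ∧ c < n)
    (hlen : ∀ p ∈ segsAux 0 n cuts, p.2.toNat ≤ xs.length) :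
    (segsAux 0 n cuts).flatMap (fun p => PySem.List.slice xs (some p.1) (some p.2))
      = ((PySem.List.pyRange 0 n 1).filter (fun i => decide (i ∉ cuts))).map
          (fun i => xs.getD i.toNat d) := by
  rw [← segsAux_flat n cuts 0 hs hm, List.map_flatMap]
  apply List.flatMap_congr
  intro p hp
  have hb := segsAux_bounds n cuts 0 hs hm p hp
  exact slice_eq_map_range xs d p.1 p.2 hb.1 (by omega) (hlen p hp)

-- B as a map over the kept Int indices (needs Pre_ for the column slices)
theorem new_matrix_alt_char (arr : List (List Int)) (dr dc : List Int)
    (hpre : Pre_new_matrix arr dr dc) (hne : arr ≠ []) :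
    new_matrix_alt arr dr dc
      = ((PySem.List.pyRange 0 (arr.length : Int) 1).filter
            (fun i => decide (i ∉ cutsOf (arr.length : Int) dr))).map
          (fun i => ((PySem.List.pyRange 0 ((arr.headD []).length : Int) 1).filter
              (fun j => decide (j ∉ cutsOf ((arr.headD []).length : Int) dc))).map
            (fun j => (arr.getD i.toNat []).getD j.toNat 0)) := by
  have hmR : ∀ c ∈ cutsOf (arr.length : Int) dr, 0 ≤ c ∧ c < (arr.length : Int) :=
    fun c hc => ((mem_cutsOf _ _ c).1 hc).2
  have hsR := pairwise_cutsOf (arr.length : Int) dr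
  have hmC : ∀ c ∈ cutsOf ((arr.headD []).length : Int) dc,
      0 ≤ c ∧ c < ((arr.headD []).length : Int) :=
    fun c hc => ((mem_cutsOf _ _ c).1 hc).2
  have hsC := pairwise_cutsOf ((arr.headD []).length : Int) dc
  unfold new_matrix_alt
  rw [if_neg (by simpa using hne)]
  simp only [pvSegments_eq, PySem.List.foldl_append_singleton_eq_map,
    PySem.List.foldl_append_eq_flatMap, List.nil_append]
  rw [← List.map_flatMap, segs_slice_eq arr [] _ _ hsR hmR
    (fun p hp => by have hb := segsAux_bounds _ _ _ hsR hmR p hp; omega)]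
  rw [List.map_map]
  apply List.map_congr_left
  intro i hi
  rw [List.mem_filter] at hi
  have hiR := PySem.List.mem_pyRange_one.1 hi.1
  have hiK : i ∉ cutsOf (arr.length : Int) dr := by simpa using hi.2
  have hiD : (i : Int) ∉ dr := fun hd => hiK ((mem_cutsOf _ _ i).2 ⟨hd, hiR.1, hiR.2⟩)
  simp only [Function.comp_apply]
  -- the row is long enough at every kept column index (from Pre_)
  refine segs_slice_eq (arr.getD i.toNat []) 0 _ _ hsC hmC ?_
  intro p hp
  have hb := segsAux_bounds _ _ _ hsC hmC p hp
  have hdm : (p.2 - 1) ∈ (PySem.List.pyRange 0 ((arr.headD []).length : Int) 1).filter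
      (fun j => decide (j ∉ cutsOf ((arr.headD []).length : Int) dc)) := by
    rw [← segsAux_flat _ _ _ hsC hmC]
    exact List.mem_flatMap.2 ⟨p, hp, PySem.List.mem_pyRange_one.2 ⟨by omega, by omega⟩⟩
  rw [List.mem_filter] at hdm
  have hdR := PySem.List.mem_pyRange_one.1 hdm.1
  have hdK : (p.2 - 1) ∉ cutsOf ((arr.headD []).length : Int) dc := by simpa using hdm.2
  have hdD : (p.2 - 1) ∉ dc := fun hd => hdK ((mem_cutsOf _ _ _).2 ⟨hd, hdR.1, hdR.2⟩)
  have hlen := hpre i.toNat (by omega) (by rwa [Int.toNat_of_nonneg hiR.1]) (p.2 - 1).toNat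
    (by omega) (by rwa [Int.toNat_of_nonneg (by omega)])
  omega

theorem new_matrix_eq_alt (arr : List (List Int)) (dr dc : List Int)
    (hpre : Pre_new_matrix arr dr dc) :
    new_matrix arr dr dc = new_matrix_alt arr dr dc := by
  rcases eq_or_ne arr [] with rfl | hne
  · rfl
  rw [new_matrix_char, new_matrix_alt_char arr dr dc hpre hne, kept_bridge, kept_bridge,
    List.map_map]
  apply List.map_congr_left
  intro i _
  simp only [Function.comp_apply, List.map_map]
  apply List.map_congr_left
  intro j _
  simp

-- ===== VERDICT =====
theorem new_matrix_spec : Claim_equal_new_matrix := by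
  intro arr dr dc _ hpre
  exact new_matrix_eq_alt arr dr dc hpre
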